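-- pv_equiv track=rewrite | github.com/jinniyuh/philippine-id-scanner | doctr_scanner.py | check_bago_resident
-- ===== SOURCE A (Python) =====
-- def check_bago_resident(text: str) -> bool:
--     """
--     Check if the resident is from Bago City, Negros Occidental
--     """
--     # Check for Bago City and Negros Occidental in the text
--     bago_indicators = [
--         'Bago City', 'Bago', 'CITY OF BAGO',
--         'Negros Occidental', 'Negros Occ.'
--     ]
--
--     text_upper = text.upper()
--     bago_found = any(indicator.upper() in text_upper for indicator in bago_indicators)
--
--     return bago_found
-- ===== SOURCE B (Python) =====
-- # Single left-to-right scan: at each position try a reduced pattern set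
-- # ('BAGO' subsumes 'Bago City'/'Bago'/'CITY OF BAGO'); early return on a hit.
-- _PATS = ('BAGO', 'NEGROS OCCIDENTAL', 'NEGROS OCC.')
--
-- def check_bago_resident(text: str) -> bool:
--     up = text.upper()
--     for i in range(len(up)):
--         for p in _PATS:
--             if up.startswith(p, i):
--                 return True
--     return False
-- ===== Notes on version B (the rewrite author's own statement) =====
-- stated objective: alternative
-- what changed: Replaces the five independent whole-text substring scans by one left-to-right scan that tries a reduced pattern set (the single token BAGO subsumes the three Bago indicators) as a prefix at each position, returning early on the first hit.
import Mathlib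
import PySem

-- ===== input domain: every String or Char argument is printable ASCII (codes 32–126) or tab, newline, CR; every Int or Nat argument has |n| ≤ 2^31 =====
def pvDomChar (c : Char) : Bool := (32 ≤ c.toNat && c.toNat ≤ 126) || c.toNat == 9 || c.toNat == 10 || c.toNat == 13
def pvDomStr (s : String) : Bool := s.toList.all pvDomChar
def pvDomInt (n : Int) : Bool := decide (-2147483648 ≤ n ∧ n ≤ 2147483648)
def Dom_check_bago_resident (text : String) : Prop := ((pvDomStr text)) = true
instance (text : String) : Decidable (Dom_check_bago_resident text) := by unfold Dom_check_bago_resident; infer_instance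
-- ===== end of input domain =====

-- B replaces five independent substring scans by one left-to-right scan with a reduced pattern set (alternative decomposition; same asymptotic cost).


-- ===== PORT A =====
def check_bago_resident (text : String) : Bool :=
  let bago_indicators : List String :=
    ["Bago City", "Bago", "CITY OF BAGO", "Negros Occidental", "Negros Occ."]
  let text_upper := PySem.Str.upper text
  bago_indicators.any (fun indicator => PySem.Str.isIn (PySem.Str.upper indicator) text_upper)

-- ===== PORT B =====
def bagoPats : List (List Char) :=
  ["BAGO".toList, "NEGROS OCCIDENTAL".toList, "NEGROS OCC.".toList]

-- the 'for i in range(len(up)) / startswith(p, i)' loop as recursion over suffixes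
def bagoScan : List Char → Bool
  | [] => false
  | l@(_ :: rest) => bagoPats.any (fun p => PySem.Chars.startswith l p) || bagoScan rest

def check_bago_resident_alt (text : String) : Bool :=
  bagoScan (PySem.Str.upper text).toList

-- ===== PRECONDITION & SPEC =====
def Spec_check_bago_resident (text : String) (out : Bool) : Prop := out = check_bago_resident_alt text
instance (text : String) (out : Bool) : Decidable (Spec_check_bago_resident text out) := by unfold Spec_check_bago_resident; infer_instance

-- ===== CLAIM (what is proved, stated in full; the proofs are below) =====
def Claim_equal_check_bago_resident : Prop := ∀ (text : String), Dom_check_bago_resident text → Spec_check_bago_resident text (check_bago_resident text)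

-- ===== LEMMAS AND PROOFS =====

lemma bagoScan_iff (l : List Char) :
    bagoScan l = true ↔ ∃ p ∈ bagoPats, p <:+: l := by
  induction l with
  | nil =>
    simp only [bagoScan, List.infix_nil]
    constructor
    · intro h; exact absurd h (by decide)
    · rintro ⟨p, hp, rfl⟩; revert hp; decide
  | cons c rest ih =>
    simp only [bagoScan, Bool.or_eq_true, List.any_eq_true,
      PySem.Chars.startswith_iff, ih, List.infix_cons_iff]
    constructor
    · rintro (⟨p, hp, h⟩ | ⟨p, hp, h⟩)
      · exact ⟨p, hp, Or.inl h⟩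
      · exact ⟨p, hp, Or.inr h⟩
    · rintro ⟨p, hp, h | h⟩
      · exact Or.inl ⟨p, hp, h⟩
      · exact Or.inr ⟨p, hp, h⟩

lemma bago_main (u : List Char) :
    (PySem.Chars.isIn "BAGO CITY".toList u || PySem.Chars.isIn "BAGO".toList u ||
     PySem.Chars.isIn "CITY OF BAGO".toList u ||
     PySem.Chars.isIn "NEGROS OCCIDENTAL".toList u ||
     PySem.Chars.isIn "NEGROS OCC.".toList u) = bagoScan u := by
  have hBC : "BAGO".toList <:+: "BAGO CITY".toList := by decide
  have hCOB : "BAGO".toList <:+: "CITY OF BAGO".toList := by decide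
  rw [Bool.eq_iff_iff]
  simp only [Bool.or_eq_true, PySem.Chars.isIn_iff_infix, bagoScan_iff, bagoPats]
  constructor
  · rintro ((((h | h) | h) | h) | h)
    · exact ⟨_, by simp, hBC.trans h⟩
    · exact ⟨_, by simp, h⟩
    · exact ⟨_, by simp, hCOB.trans h⟩
    · exact ⟨_, by simp, h⟩
    · exact ⟨_, by simp, h⟩
  · rintro ⟨p, hp, h⟩
    simp only [List.mem_cons, List.not_mem_nil, or_false] at hp
    rcases hp with rfl | rfl | rfl
    · exact Or.inl (Or.inl (Or.inl (Or.inr h)))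
    · exact Or.inl (Or.inr h)
    · exact Or.inr h

-- ===== VERDICT (by name: the statement is the Claim_ definition above) =====
set_option maxHeartbeats 1000000 in
theorem check_bago_resident_spec : Claim_equal_check_bago_resident := by
  intro text _
  unfold Spec_check_bago_resident check_bago_resident check_bago_resident_alt
  simp only [List.any_cons, List.any_nil, Bool.or_false, PySem.Str.isIn_eq]
  rw [show (PySem.Str.upper "Bago City").toList = "BAGO CITY".toList from by rfl,
      show (PySem.Str.upper "Bago").toList = "BAGO".toList from by rfl,
      show (PySem.Str.upper "CITY OF BAGO").toList = "CITY OF BAGO".toList from by rfl,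
      show (PySem.Str.upper "Negros Occidental").toList = "NEGROS OCCIDENTAL".toList from by rfl,
      show (PySem.Str.upper "Negros Occ.").toList = "NEGROS OCC.".toList from by rfl]
  simpa only [Bool.or_assoc] using bago_main _
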